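-- pv_equiv track=rewrite | github.com/DNCHOW1/CompetitiveProgramming | contests/cfedu139_div2/b.py | can_type_string
-- ===== SOURCE A (Python) =====
-- def can_type_string(s):
--     # Initialize the prefix function to 0
--     prefix = [0] * len(s)
--
--     # Calculate the prefix function using the KMP algorithm
--     j = 0
--     for i in range(1, len(s)):
--         while j > 0 and s[i] != s[j]:
--             j = prefix[j - 1]
--         if s[i] == s[j]:
--             j += 1
--         prefix[i] = j
--
--     # Check if there exists a proper prefix-suffix of s
--     return prefix[-1] > 0
-- ===== SOURCE B (Python) =====
-- def can_type_string(s):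
--     n = len(s)
--     return any(s[:k] == s[n - k:] for k in range(1, n))
-- ===== Notes on version B (the rewrite author's own statement) =====
-- stated objective: simpler
-- what changed: Replaced the KMP prefix-function computation with a direct one-line brute-force border search: any k in 1..n-1 with s[:k] == s[n-k:].
import Mathlib
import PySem

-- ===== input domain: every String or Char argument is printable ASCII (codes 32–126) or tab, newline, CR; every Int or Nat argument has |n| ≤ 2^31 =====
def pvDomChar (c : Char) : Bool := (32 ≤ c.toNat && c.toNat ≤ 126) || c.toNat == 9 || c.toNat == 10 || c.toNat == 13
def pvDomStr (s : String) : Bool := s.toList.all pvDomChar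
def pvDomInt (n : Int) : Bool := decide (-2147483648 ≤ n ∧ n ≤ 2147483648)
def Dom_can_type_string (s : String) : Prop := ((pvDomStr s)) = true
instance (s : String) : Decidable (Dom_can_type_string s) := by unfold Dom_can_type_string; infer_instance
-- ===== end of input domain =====

-- B replaces A's KMP prefix-function computation by a direct brute-force border search
-- (any k in 1..n-1 with s[:k] == s[n-k:]); simpler, not faster. The empty string, on which
-- A raises IndexError (prefix[-1]) and B returns False, is excluded by Pre_.


-- ===== PORT A =====
-- the inner `while` is ported with a fuel counter equal to the entry value of j (enough,
-- since each iteration strictly decreases j); list indexing s[i], s[j], prefix[j-1] —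
-- always in range in Python's actual runs — is ported with getD (exact on those runs).
def kmpWhile (pre : List Nat) (l : List Char) (c : Char) : Nat → Nat → Nat
  | 0, j => j
  | fuel+1, j =>
    if 0 < j ∧ c ≠ l.getD j ' ' then kmpWhile pre l c fuel (pre.getD (j-1) 0) else j

def kmpStep (l : List Char) (st : List Nat × Nat) (i : Nat) : List Nat × Nat :=
  let j1 := kmpWhile st.1 l (l.getD i ' ') st.2 st.2
  let j2 := if l.getD i ' ' = l.getD j1 ' ' then j1 + 1 else j1
  (st.1.set i j2, j2)

def can_type_string (s : String) : Bool :=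
  let l := s.toList
  let st := (List.range' 1 (l.length - 1)).foldl (kmpStep l) (List.replicate l.length 0, 0)
  decide (0 < st.1.getD (st.1.length - 1) 0)

-- ===== PORT B =====
-- s[:k] and s[n-k:] for 1 ≤ k < n are exactly take k and drop (n - k).
def can_type_string_alt (s : String) : Bool :=
  let l := s.toList
  (List.range' 1 (l.length - 1)).any (fun k => l.take k == l.drop (l.length - k))

-- ===== PRECONDITION & SPEC =====
-- Pre_ excludes only the empty string, on which A raises IndexError (prefix[-1]).
def Pre_can_type_string (s : String) : Prop := s ≠ ""
instance (s : String) : Decidable (Pre_can_type_string s) := by unfold Pre_can_type_string; infer_instance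
def pvWitness_can_type_string : String := "ab"

def Spec_can_type_string (s : String) (out : Bool) : Prop := out = can_type_string_alt s
instance (s : String) (out : Bool) : Decidable (Spec_can_type_string s out) := by unfold Spec_can_type_string; infer_instance

-- ===== CLAIM (what is proved, stated in full; the proofs are below) =====
def Claim_equal_can_type_string : Prop := ∀ (s : String), Dom_can_type_string s → Pre_can_type_string s → Spec_can_type_string s (can_type_string s)

-- ===== LEMMAS AND PROOFS =====

-- maximal proper border length of v (the value of Python's prefix function at v's last index)
def pvMB (v : List Char) : Nat :=
  Nat.findGreatest (fun k => v.take k = v.drop (v.length - k)) (v.length - 1)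

-- k is a border length of v
def Brd (v : List Char) (k : Nat) : Prop :=
  k ≤ v.length ∧ v.take k = v.drop (v.length - k)

lemma pvMB_le (v : List Char) : pvMB v ≤ v.length - 1 := Nat.findGreatest_le _

lemma brd_pvMB (v : List Char) : Brd v (pvMB v) := by
  refine ⟨le_trans (pvMB_le v) (Nat.sub_le _ _), ?_⟩
  rcases Nat.eq_zero_or_pos (pvMB v) with h | h
  · rw [h]; simp
  · exact Nat.findGreatest_of_ne_zero rfl (Nat.pos_iff_ne_zero.mp h)

lemma le_pvMB {v : List Char} {k : Nat} (hk : k ≤ v.length - 1)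
    (h : v.take k = v.drop (v.length - k)) : k ≤ pvMB v :=
  Nat.le_findGreatest hk h

lemma take_drop_of_brd {u : List Char} {j k : Nat} (hj : Brd u j) (hk : k ≤ j) :
    (u.take j).drop (j - k) = u.drop (u.length - k) := by
  obtain ⟨hjl, hje⟩ := hj
  rw [hje, List.drop_drop]
  congr 1
  omega

lemma brd_trans {u : List Char} {j k : Nat} (hj : Brd u j) (hk : Brd (u.take j) k) :
    Brd u k := by
  obtain ⟨hkl, hke⟩ := hk
  have hjl := hj.1
  have hlen : (u.take j).length = j := by simp; omega
  rw [hlen] at hkl hke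
  refine ⟨by omega, ?_⟩
  have h1 : (u.take j).take k = u.take k := by rw [List.take_take]; congr 1; omega
  rw [← h1, hke]
  exact take_drop_of_brd hj (by omega)

lemma brd_down {u : List Char} {m j : Nat} (hm : Brd u m) (hj : Brd u j) (hmj : m ≤ j) :
    Brd (u.take j) m := by
  have hjl := hj.1
  have hlen : (u.take j).length = j := by simp; omega
  refine ⟨by rw [hlen]; exact hmj, ?_⟩
  rw [hlen]
  have h1 : (u.take j).take m = u.take m := by rw [List.take_take]; congr 1; omega
  rw [h1, take_drop_of_brd hj hmj]
  exact hm.2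

lemma brd_ext {l : List Char} {i k : Nat} (hi : i < l.length) (hk : k < i) :
    Brd (l.take (i+1)) (k+1) ↔
      (Brd (l.take i) k ∧ l.getD k ' ' = l.getD i ' ') := by
  have hkl : k < l.length := by omega
  have hw : l.take (i+1) = l.take i ++ [l[i]] := List.take_succ_eq_append_getElem hi
  have hul : (l.take i).length = i := by simp; omega
  have hwl : (l.take (i+1)).length = i + 1 := by simp; omega
  have hc : l.getD i ' ' = l[i] := List.getD_eq_getElem l ' ' hi
  have hck : l.getD k ' ' = l[k] := List.getD_eq_getElem l ' ' hkl
  have e1 : (l.take (i+1)).take (k+1) = l.take k ++ [l[k]] := by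
    rw [List.take_take, show min (k+1) (i+1) = k + 1 from by omega]
    exact List.take_succ_eq_append_getElem hkl
  have e2 : (l.take (i+1)).drop ((l.take (i+1)).length - (k+1)) =
      (l.take i).drop (i - k) ++ [l[i]] := by
    rw [hwl, hw, show i + 1 - (k+1) = i - k from by omega,
      List.drop_append_of_le_length (by rw [hul]; omega)]
  have e3 : (l.take i).take k = l.take k := by rw [List.take_take]; congr 1; omega
  constructor
  · rintro ⟨hle, heq⟩
    rw [e1, e2] at heq
    obtain ⟨h1, h2⟩ := List.append_singleton_inj.mp heq
    refine ⟨⟨by omega, ?_⟩, ?_⟩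
    · rw [hul, e3]; exact h1
    · rw [hck, hc]; exact h2
  · rintro ⟨⟨hble, hbeq⟩, hg⟩
    refine ⟨by rw [hwl]; omega, ?_⟩
    rw [e1, e2]
    apply List.append_singleton_inj.mpr
    constructor
    · rw [← e3]
      rw [hul] at hbeq
      exact hbeq
    · rw [hck, hc] at hg; exact hg

lemma pvMB_take_one (l : List Char) : pvMB (l.take 1) = 0 := by
  unfold pvMB
  rw [show (l.take 1).length - 1 = 0 from by simp]
  rfl

lemma while_spec (pre : List Nat) (l : List Char) (i : Nat)
    (hi : i < l.length)
    (hpre : ∀ t, t < i → pre.getD t 0 = pvMB (l.take (t+1))) :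
    ∀ fuel j, j ≤ fuel → Brd (l.take i) j → j < i →
      (∀ m, m < i → Brd (l.take i) m → l.getD m ' ' = l.getD i ' ' → m ≤ j) →
      Brd (l.take i) (kmpWhile pre l (l.getD i ' ') fuel j) ∧
      kmpWhile pre l (l.getD i ' ') fuel j < i ∧
      (∀ m, m < i → Brd (l.take i) m → l.getD m ' ' = l.getD i ' ' →
        m ≤ kmpWhile pre l (l.getD i ' ') fuel j) ∧
      (l.getD i ' ' ≠ l.getD (kmpWhile pre l (l.getD i ' ') fuel j) ' ' →
        kmpWhile pre l (l.getD i ' ') fuel j = 0 ∧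
        ∀ m, m < i → Brd (l.take i) m → l.getD m ' ' ≠ l.getD i ' ') := by
  intro fuel
  induction fuel with
  | zero =>
    intro j hfuel hbrd hlt hmax
    have hj0 : j = 0 := by omega
    subst hj0
    simp only [kmpWhile]
    refine ⟨hbrd, hlt, hmax, ?_⟩
    intro hne
    refine ⟨by trivial, ?_⟩
    intro m hm hbm hgm
    have : m = 0 := by have := hmax m hm hbm hgm; omega
    subst this
    exact hne hgm.symm
  | succ fuel ih =>
    intro j hfuel hbrd hlt hmax
    simp only [kmpWhile]
    by_cases hcond : 0 < j ∧ l.getD i ' ' ≠ l.getD j ' '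
    · rw [if_pos hcond]
      have hj1 : 1 ≤ j := hcond.1
      have hj' : pre.getD (j-1) 0 = pvMB (l.take j) := by
        rw [hpre (j-1) (by omega), show j - 1 + 1 = j from by omega]
      have htt : (l.take i).take j = l.take j := by rw [List.take_take]; congr 1; omega
      have hlj : (l.take j).length = j := by simp; omega
      have hbrd' : Brd (l.take i) (pre.getD (j-1) 0) := by
        apply brd_trans hbrd
        rw [htt, hj']
        exact brd_pvMB _
      have hlt' : pre.getD (j-1) 0 < j := by
        rw [hj']
        have := pvMB_le (l.take j)
        omega
      have hmax' : ∀ m, m < i → Brd (l.take i) m → l.getD m ' ' = l.getD i ' ' →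
          m ≤ pre.getD (j-1) 0 := by
        intro m hm hbm hgm
        have hmj : m ≤ j := hmax m hm hbm hgm
        have hmne : m ≠ j := by rintro rfl; exact hcond.2 hgm.symm
        have hdown : Brd (l.take j) m := by
          rw [← htt]; exact brd_down hbm hbrd (by omega)
        rw [hj']
        exact le_pvMB (by omega) hdown.2
      exact ih (pre.getD (j-1) 0) (by omega) hbrd' (by omega) hmax'
    · rw [if_neg hcond]
      refine ⟨hbrd, hlt, hmax, ?_⟩
      intro hne
      push Not at hcond
      have hj0 : j = 0 := by
        by_contra h0
        exact hne (hcond (by omega))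
      refine ⟨hj0, ?_⟩
      intro m hm hbm hgm
      have : m = 0 := by have := hmax m hm hbm hgm; omega
      subst this
      rw [hj0] at hne
      exact hne hgm.symm

lemma step_mB (l : List Char) (pre : List Nat) (j : Nat) (i : Nat)
    (hi : i < l.length) (hi1 : 1 ≤ i)
    (hpre : ∀ t, t < i → pre.getD t 0 = pvMB (l.take (t+1)))
    (hj : j = pvMB (l.take i)) :
    (if l.getD i ' ' = l.getD (kmpWhile pre l (l.getD i ' ') j j) ' '
      then kmpWhile pre l (l.getD i ' ') j j + 1
      else kmpWhile pre l (l.getD i ' ') j j) = pvMB (l.take (i+1)) := by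
  have hul : (l.take i).length = i := by simp; omega
  have hwl : (l.take (i+1)).length = i + 1 := by simp; omega
  have hb0 : Brd (l.take i) j := hj ▸ brd_pvMB _
  have hlt0 : j < i := by
    rw [hj]; have := pvMB_le (l.take i); omega
  have hmax0 : ∀ m, m < i → Brd (l.take i) m → l.getD m ' ' = l.getD i ' ' → m ≤ j := by
    intro m hm hbm _
    rw [hj]
    exact le_pvMB (by omega) hbm.2
  obtain ⟨hbr, hltr, hmaxr, hmis⟩ := while_spec pre l i hi hpre j j le_rfl hb0 hlt0 hmax0
  set jr := kmpWhile pre l (l.getD i ' ') j j with hjr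
  by_cases hm : l.getD i ' ' = l.getD jr ' '
  · rw [if_pos hm]
    apply le_antisymm
    · apply le_pvMB (by omega)
      exact ((brd_ext hi hltr).mpr ⟨hbr, hm.symm⟩).2
    · rcases Nat.eq_zero_or_pos (pvMB (l.take (i+1))) with h0 | hpos
      · omega
      · have hBM : Brd (l.take (i+1)) (pvMB (l.take (i+1))) := brd_pvMB _
        have hMle : pvMB (l.take (i+1)) ≤ i := by
          have := pvMB_le (l.take (i+1)); omega
        have hx := (brd_ext hi (show pvMB (l.take (i+1)) - 1 < i from by omega)).mp
          (by rw [show pvMB (l.take (i+1)) - 1 + 1 = pvMB (l.take (i+1)) from by omega]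
              exact hBM)
        have := hmaxr (pvMB (l.take (i+1)) - 1) (by omega) hx.1 hx.2
        omega
  · rw [if_neg hm]
    obtain ⟨hz, hnone⟩ := hmis hm
    rw [hz]
    symm
    unfold pvMB
    apply Nat.findGreatest_eq_zero_iff.mpr
    intro nn hn0 hnle hP
    have hnle' : nn ≤ i := by omega
    have hB : Brd (l.take (i+1)) nn := ⟨by omega, hP⟩
    have hx := (brd_ext hi (show nn - 1 < i from by omega)).mp
      (by rw [show nn - 1 + 1 = nn from by omega]; exact hB)
    exact hnone (nn-1) (by omega) hx.1 hx.2

lemma fold_inv (l : List Char) (m : Nat) (hm : m + 1 ≤ l.length) :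
    ((List.range' 1 m).foldl (kmpStep l) (List.replicate l.length 0, 0)).1.length = l.length ∧
    ((List.range' 1 m).foldl (kmpStep l) (List.replicate l.length 0, 0)).2 = pvMB (l.take (m+1)) ∧
    ∀ t, t ≤ m →
      ((List.range' 1 m).foldl (kmpStep l) (List.replicate l.length 0, 0)).1.getD t 0 =
        pvMB (l.take (t+1)) := by
  induction m with
  | zero =>
    simp only [List.range'_zero, List.foldl_nil]
    refine ⟨by simp, by rw [pvMB_take_one], ?_⟩
    intro t ht
    have : t = 0 := by omega
    subst this
    rw [pvMB_take_one]
    simp [List.getD_eq_getElem?_getD, List.getElem?_replicate]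
    split <;> simp
  | succ m ih =>
    obtain ⟨hlen, hj, hpre⟩ := ih (by omega)
    rw [List.range'_1_concat, List.foldl_append, List.foldl_cons, List.foldl_nil]
    set st := (List.range' 1 m).foldl (kmpStep l) (List.replicate l.length 0, 0) with hst
    have h1m : 1 + m = m + 1 := by omega
    rw [h1m]
    have hstep := step_mB l st.1 st.2 (m+1) (by omega) (by omega)
      (fun t ht => hpre t (by omega)) hj
    simp only [kmpStep]
    refine ⟨by simp [hlen], hstep, ?_⟩
    intro t ht
    by_cases hti : t = m + 1
    · subst hti
      rw [List.getD_eq_getElem?_getD, List.getElem?_set_self (by omega)]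
      simpa using hstep
    · have htm : t ≤ m := by omega
      rw [List.getD_eq_getElem?_getD, List.getElem?_set_ne (by omega)]
      rw [← List.getD_eq_getElem?_getD]
      exact hpre t htm

lemma can_type_string_eq_pvMB (s : String) (h : s.toList ≠ []) :
    can_type_string s = decide (0 < pvMB s.toList) := by
  have hl : 1 ≤ s.toList.length := by
    cases hc : s.toList with
    | nil => exact absurd hc h
    | cons a as => simp
  obtain ⟨hlen, hj, hpre⟩ := fold_inv s.toList (s.toList.length - 1) (by omega)
  simp only [can_type_string]
  rw [hlen, hpre (s.toList.length - 1) le_rfl,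
    show s.toList.length - 1 + 1 = s.toList.length from by omega, List.take_length]

lemma can_type_string_alt_eq_pvMB (s : String) :
    can_type_string_alt s = decide (0 < pvMB s.toList) := by
  simp only [can_type_string_alt]
  rw [Bool.eq_iff_iff]
  simp only [List.any_eq_true, List.mem_range'_1, beq_iff_eq, decide_eq_true_eq]
  rw [pvMB, Nat.findGreatest_pos]
  constructor
  · rintro ⟨k, ⟨h1, h2⟩, h3⟩
    exact ⟨k, by omega, by omega, h3⟩
  · rintro ⟨k, h1, h2, h3⟩
    exact ⟨k, ⟨by omega, by omega⟩, h3⟩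

-- ===== VERDICT (by name: the statement is the Claim_ definition above) =====
theorem can_type_string_spec : Claim_equal_can_type_string := by
  intro s _ hpre
  unfold Spec_can_type_string
  have h : s.toList ≠ [] := fun hh => hpre (String.toList_eq_nil_iff.mp hh)
  rw [can_type_string_eq_pvMB s h, can_type_string_alt_eq_pvMB s]
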